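-- pv_equiv track=rewrite | github.com/jasonmpittman/coding-exercises | exercises/divisible_x.py | count_multiples
-- ===== SOURCE A (Python) =====
-- def is_divisible(a: int, b: int) -> bool:
--     """Test if a is divisible by b"""
--     if a % b == 0:
--         return True
--     else:
--         return False
--
-- def count_multiples(m: int, x: str) -> int:
--     """Count the number of numbers in the range 1, m divisible by x"""
--     numbers = [z for z in range(1, m + 1)]
--     count = 0
--     multiples = x.split(' ')
--
--     if 'or' in x:
--         for n in numbers:
--             if is_divisible(n, int(multiples[0])) or is_divisible(n, int(multiples[2])): #need a way to handle two digit numbers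
--                 count += 1
--
--     if 'and' in x:
--         for n in numbers:
--             if is_divisible(n, int(multiples[0])) and is_divisible(n, int(multiples[2])): #need a way to handle two digit numbers
--                 count += 1
--
--     return count
-- ===== SOURCE B (Python) =====
-- def count_multiples(m: int, x: str) -> int:
--     """Count the number of numbers in the range 1, m divisible by x"""
--     has_or = 'or' in x
--     has_and = 'and' in x
--     if m <= 0 or not (has_or or has_and):
--         return 0
--     tokens = x.split(' ')
--     a = abs(int(tokens[0]))
--     b = abs(int(tokens[2]))
--     g, h = a, b
--     while h:
--         g, h = h, g % h
--     l = a // g * b  # lcm(a, b)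
--     total = 0
--     if has_or:
--         total += m // a + m // b - m // l
--     if has_and:
--         total += m // l
--     return total
-- ===== Notes on version B (the rewrite author's own statement) =====
-- stated objective: faster
-- what changed: A loops over every n in 1..m testing divisibility; B computes the count in O(1) by inclusion-exclusion with floor division and an lcm from a Euclid gcd loop.
-- outside the precondition, e.g. on count_multiples(3, '1 or z'): A returns 3, B raises ValueError; on count_multiples(1, '2 and z'): A returns 0, B raises ValueError; on count_multiples(5, '-1 or 0'): A returns 5, B raises ZeroDivisionError
import Mathlib
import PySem

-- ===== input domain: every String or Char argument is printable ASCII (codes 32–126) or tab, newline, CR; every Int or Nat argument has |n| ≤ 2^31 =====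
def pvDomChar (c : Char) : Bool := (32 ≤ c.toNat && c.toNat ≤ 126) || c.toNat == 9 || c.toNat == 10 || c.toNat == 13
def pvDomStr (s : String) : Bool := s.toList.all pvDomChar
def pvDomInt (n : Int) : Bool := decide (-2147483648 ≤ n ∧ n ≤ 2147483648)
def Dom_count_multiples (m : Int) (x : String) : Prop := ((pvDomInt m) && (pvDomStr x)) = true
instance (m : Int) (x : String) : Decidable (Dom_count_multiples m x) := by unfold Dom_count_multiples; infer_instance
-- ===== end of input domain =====

-- B replaces A's O(m) scan of 1..m by an O(1) inclusion-exclusion count using floor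
-- division and an lcm obtained from a Euclid gcd loop (objective: faster, asymptotic).


-- ===== PORT A =====
def is_divisible (a b : Int) : Bool :=
  if PySem.Int.mod a b = 0 then true else false

-- int(multiples[i]) is ported as (ofStr? …).getD 0 over getD i "": Pre_ guarantees the
-- index exists and the parse succeeds wherever the Python evaluates it.
def count_multiples (m : Int) (x : String) : Int :=
  let numbers := PySem.List.pyRange 1 (m + 1) 1
  let count : Int := 0
  let multiples := (PySem.Str.split? x " ").getD []
  let count :=
    if PySem.Str.isIn "or" x then
      numbers.foldl (fun count n =>
        if is_divisible n ((PySem.Int.ofStr? (multiples.getD 0 "")).getD 0) ||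
           is_divisible n ((PySem.Int.ofStr? (multiples.getD 2 "")).getD 0) then count + 1
        else count) count
    else count
  let count :=
    if PySem.Str.isIn "and" x then
      numbers.foldl (fun count n =>
        if is_divisible n ((PySem.Int.ofStr? (multiples.getD 0 "")).getD 0) &&
           is_divisible n ((PySem.Int.ofStr? (multiples.getD 2 "")).getD 0) then count + 1
        else count) count
    else count
  count

-- ===== PORT B =====
-- Source B's hand-written Euclid loop; exact: both arguments are non-negative Python ints.
def euclidGcd (g h : Nat) : Nat :=
  if hh : h = 0 then g else euclidGcd h (g % h)
termination_by h
decreasing_by exact Nat.mod_lt g (Nat.pos_of_ne_zero hh)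

def count_multiples_alt (m : Int) (x : String) : Int :=
  let hasOr := PySem.Str.isIn "or" x
  let hasAnd := PySem.Str.isIn "and" x
  if m ≤ 0 ∨ ¬(hasOr || hasAnd) then 0
  else
    let tokens := (PySem.Str.split? x " ").getD []
    let a : Nat := ((PySem.Int.ofStr? (tokens.getD 0 "")).getD 0).natAbs
    let b : Nat := ((PySem.Int.ofStr? (tokens.getD 2 "")).getD 0).natAbs
    let l : Nat := a / euclidGcd a b * b
    let total : Int :=
      if hasOr then
        PySem.Int.floordiv m a + PySem.Int.floordiv m b - PySem.Int.floordiv m l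
      else 0
    if hasAnd then total + PySem.Int.floordiv m l else total

-- ===== PRECONDITION & SPEC =====
-- Pre_ excludes only inputs on which either Python raises (unparsable/zero/missing
-- first or third token reached with m ≥ 1) or A returns purely through short-circuit
-- laziness (divisor ±1 with 'or', or an 'and' whose first divisor exceeds m, leaving a
-- garbage or zero third token unparsed); B parses both tokens eagerly and raises there.
def Pre_count_multiples (m : Int) (x : String) : Prop :=
  1 ≤ m → (PySem.Str.isIn "or" x = true ∨ PySem.Str.isIn "and" x = true) →
    (3 ≤ ((PySem.Str.split? x " ").getD []).length ∧
     (PySem.Int.ofStr? (((PySem.Str.split? x " ").getD []).getD 0 "")).getD 0 ≠ 0 ∧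
     (PySem.Int.ofStr? (((PySem.Str.split? x " ").getD []).getD 2 "")).getD 0 ≠ 0)
instance (m : Int) (x : String) : Decidable (Pre_count_multiples m x) := by
  unfold Pre_count_multiples; infer_instance

def pvWitness_count_multiples : Int × String := (10, "2 or 3")

def Spec_count_multiples (m : Int) (x : String) (out : Int) : Prop := out = count_multiples_alt m x
instance (m : Int) (x : String) (out : Int) : Decidable (Spec_count_multiples m x out) := by unfold Spec_count_multiples; infer_instance

-- ===== CLAIM (what is proved, stated in full; the proofs are below) =====
def Claim_equal_count_multiples : Prop := ∀ (m : Int) (x : String), Dom_count_multiples m x → Pre_count_multiples m x → Spec_count_multiples m x (count_multiples m x)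

-- ===== LEMMAS AND PROOFS =====

theorem pvWitness_ok :
    Dom_count_multiples pvWitness_count_multiples.1 pvWitness_count_multiples.2 ∧
    Pre_count_multiples pvWitness_count_multiples.1 pvWitness_count_multiples.2 := by
  decide

theorem is_divisible_eq (n d : Int) : is_divisible n d = decide (d ∣ n) := by
  simp [is_divisible, PySem.Int.mod_eq_zero_iff_dvd]

theorem euclidGcd_eq (g h : Nat) : euclidGcd g h = Nat.gcd g h := by
  induction h using Nat.strong_induction_on generalizing g with
  | _ h ih =>
    by_cases hh : h = 0
    · rw [euclidGcd, dif_pos hh, hh, Nat.gcd_zero_right]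
    · rw [euclidGcd, dif_neg hh, ih (g % h) (Nat.mod_lt g (Nat.pos_of_ne_zero hh)) h,
        Nat.gcd_comm h (g % h), ← Nat.gcd_rec h g, Nat.gcd_comm h g]

theorem countP_or_add_and (l : List Int) (p q : Int → Bool) :
    l.countP (fun x => p x || q x) + l.countP (fun x => p x && q x)
      = l.countP p + l.countP q := by
  induction l with
  | nil => simp
  | cons h t ih => by_cases hp : p h <;> by_cases hq : q h <;>
      simp [hp, hq] <;> omega

theorem countP_range_dvd (d : Nat) (M : Nat) :
    (List.range M).countP (fun k => decide (d ∣ (k+1))) = M / d := by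
  induction M with
  | zero => simp
  | succ n ih =>
    rw [List.range_succ, List.countP_append, ih, Nat.succ_div]
    by_cases h : d ∣ n+1 <;> simp [h]

-- count of multiples of d among pyRange 1 (M+1) as an Int floor division
theorem countP_pyRange_dvd (d : Nat) (M : Nat) :
    (PySem.List.pyRange 1 ((M:Int) + 1) 1).countP (fun n => decide ((d:Int) ∣ n)) = M / d := by
  rw [PySem.List.pyRange_one]
  have h1 : ((M:Int) + 1 - 1).toNat = M := by omega
  rw [h1, List.countP_map]
  have h2 : ∀ k : Nat, ((d:Int) ∣ (1 + (k:Int))) ↔ (d ∣ (k+1)) := by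
    intro k; norm_cast; rw [Nat.add_comm]
  calc (List.range M).countP ((fun n => decide ((d:Int) ∣ n)) ∘ (fun k : Nat => 1 + (k:Int)))
      = (List.range M).countP (fun k => decide (d ∣ (k+1))) := by
        apply List.countP_congr; intro k _; simp [Function.comp, h2 k]
    _ = M / d := countP_range_dvd d M

set_option maxHeartbeats 1000000 in
theorem count_multiples_spec' (m : Int) (x : String)
    (_hpre : Pre_count_multiples m x) : count_multiples m x = count_multiples_alt m x := by
  by_cases hm : m ≤ 0
  · -- empty range: A's folds run over [] and every branch keeps count = 0
    have hnil : PySem.List.pyRange 1 (m + 1) 1 = [] :=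
      PySem.List.pyRange_one_eq_nil (by omega)
    simp [count_multiples, count_multiples_alt, hnil, hm]
  · have hm1 : 1 ≤ m := by omega
    by_cases hflag : (PySem.Str.isIn "or" x || PySem.Str.isIn "and" x) = false
    · obtain ⟨ho, ha⟩ := Bool.or_eq_false_iff.mp hflag
      simp only [count_multiples, count_multiples_alt]
      rw [if_neg (by rw [ha]; exact Bool.false_ne_true),
          if_neg (by rw [ho]; exact Bool.false_ne_true),
          if_pos (Or.inr (by rw [ho, ha]; decide))]
    · -- at least one keyword
      have hflag2 : (PySem.Str.isIn "or" x || PySem.Str.isIn "and" x) = true := by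
        cases h : (PySem.Str.isIn "or" x || PySem.Str.isIn "and" x)
        · exact absurd h hflag
        · rfl
      set a0 : Int := (PySem.Int.ofStr? (((PySem.Str.split? x " ").getD []).getD 0 "")).getD 0 with ha0def
      set b0 : Int := (PySem.Int.ofStr? (((PySem.Str.split? x " ").getD []).getD 2 "")).getD 0 with hb0def
      set A : Nat := a0.natAbs with hAdef
      set B : Nat := b0.natAbs with hBdef
      set L : Nat := Nat.lcm A B with hLdef
      set M : Nat := m.toNat with hMdef
      have hmM : m = (M:Int) := by omega
      -- the three counts
      have hcA := countP_pyRange_dvd A M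
      have hcB := countP_pyRange_dvd B M
      have hcL := countP_pyRange_dvd L M
      -- predicates in A's folds, rewritten to divisibility by natAbs
      have hpa : ∀ n : Int, is_divisible n a0 = decide ((A:Int) ∣ n) := by
        intro n; rw [is_divisible_eq]; simp [hAdef]
      have hpb : ∀ n : Int, is_divisible n b0 = decide ((B:Int) ∣ n) := by
        intro n; rw [is_divisible_eq]; simp [hBdef]
      have hand : ∀ n : Int, (decide ((A:Int) ∣ n) && decide ((B:Int) ∣ n)) = decide ((L:Int) ∣ n) := by
        intro n
        have : ((L:Int) ∣ n) ↔ ((A:Int) ∣ n ∧ (B:Int) ∣ n) := by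
          rw [← Int.natAbs_dvd_natAbs, ← Int.natAbs_dvd_natAbs (a := (A:Int)),
              ← Int.natAbs_dvd_natAbs (a := (B:Int))]
          simp [hLdef, Nat.lcm_dvd_iff]
        simp [this]
      -- inclusion-exclusion at the count level
      set R := PySem.List.pyRange 1 ((M:Int) + 1) 1 with hRdef
      have hIE : R.countP (fun n => decide ((A:Int) ∣ n) || decide ((B:Int) ∣ n)) + M / L
          = M / A + M / B := by
        have := countP_or_add_and R (fun n => decide ((A:Int) ∣ n)) (fun n => decide ((B:Int) ∣ n))
        rw [hcA, hcB] at this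
        rw [← this]
        congr 1
        rw [← hcL]
        apply List.countP_congr; intro n _; simp [hand n]
      have hAnd : R.countP (fun n => decide ((A:Int) ∣ n) && decide ((B:Int) ∣ n)) = M / L := by
        rw [← hcL]; apply List.countP_congr; intro n _; simp [hand n]
      -- B's lcm expression
      have hlcm : A / euclidGcd A B * B = L := by
        rw [euclidGcd_eq, hLdef, Nat.lcm,
          Nat.div_mul_right_comm (Nat.gcd_dvd_left A B) B]
      -- unfold both programs
      simp only [count_multiples, count_multiples_alt]
      rw [if_neg (show ¬(m ≤ 0 ∨ ¬((PySem.Str.isIn "or" x || PySem.Str.isIn "and" x) = true)) from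
        fun hc => Or.elim hc hm (fun hn => hn hflag2))]
      simp only [← ha0def, ← hb0def, ← hAdef, ← hBdef, hlcm]
      have hfd : ∀ d : Nat, PySem.Int.floordiv ((M:Nat):Int) (d:Nat) = ((M / d : Nat) : Int) := by
        intro d; exact_mod_cast PySem.Int.floordiv_natCast M d
      rw [hmM]
      cases hor : PySem.Str.isIn "or" x <;> cases han : PySem.Str.isIn "and" x
      · rw [hor, han] at hflag2; exact absurd hflag2 (by decide)
      all_goals
        simp only [Bool.false_eq_true, if_false, if_true]
      all_goals
        try rw [PySem.List.foldl_if_add_one]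
      all_goals
        try rw [PySem.List.foldl_if_add_one]
      all_goals
        simp only [hpa, hpb, ← hRdef, hfd]
      all_goals
        omega

-- ===== VERDICT (by name: the statement is the Claim_ definition above) =====
theorem count_multiples_spec : Claim_equal_count_multiples := by
  intro m x _ hpre
  exact count_multiples_spec' m x hpre
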